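-- pv_equiv track=rewrite | github.com/RuneWind/MSA_PiB | MSA_ext.py | get_gap_regions
-- ===== SOURCE A (Python) =====
-- def get_gap_regions(MSA):
--     gap_idx = []
--
--     i = 0
--     while i < len(MSA[0]):
--         if MSA[0][i] != "-":
--             i += 1
--         else:
--             start_idx = i
--             i += 1
--             while i < len(MSA[0]) and MSA[0][i] == "-":
--                 i += 1
--             end_idx = i
--             if end_idx - start_idx > 1:
--                 gap_idx.append([start_idx, end_idx])
--     return gap_idx
-- ===== SOURCE B (Python) =====
-- def get_gap_regions(MSA):
--     # Phase 1: run-length encode the first sequence; Phase 2: filter dash runs of length > 1.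
--     seq = MSA[0]
--     n = len(seq)
--     runs = []
--     i = 0
--     while i < n:
--         j = i
--         while j < n and seq[j] == seq[i]:
--             j += 1
--         runs.append((seq[i], j - i))
--         i = j
--     regions = []
--     pos = 0
--     for ch, length in runs:
--         end = pos + length
--         if ch == '-' and length > 1:
--             regions.append([pos, end])
--         pos = end
--     return regions
-- ===== Notes on version B (the rewrite author's own statement) =====
-- stated objective: alternative
-- what changed: B run-length-encodes the whole sequence in one uniform pass and then filters/maps the runs, instead of A's hand-written scan that treats dash characters specially inline.
import Mathlib
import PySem

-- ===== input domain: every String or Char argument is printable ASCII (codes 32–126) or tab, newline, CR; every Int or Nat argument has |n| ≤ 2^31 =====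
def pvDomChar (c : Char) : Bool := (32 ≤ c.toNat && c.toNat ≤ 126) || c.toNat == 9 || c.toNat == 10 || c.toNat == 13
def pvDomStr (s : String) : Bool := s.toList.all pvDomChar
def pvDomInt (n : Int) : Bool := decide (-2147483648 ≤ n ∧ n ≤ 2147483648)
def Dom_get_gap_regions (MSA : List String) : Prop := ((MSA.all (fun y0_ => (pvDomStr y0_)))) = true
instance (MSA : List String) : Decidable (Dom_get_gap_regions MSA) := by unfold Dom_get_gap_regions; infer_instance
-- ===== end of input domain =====

-- B re-implements A as a uniform run-length encoding followed by a filter of the dash runs;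
-- equivalence of the return values is proved on Pre_ (MSA nonempty; on an empty MSA list both Pythons raise IndexError).

-- ===== PORT A =====
-- inner while of A: number of leading '-' characters
def pvCountDashes : List Char → Nat
  | [] => 0
  | c :: r => if c = '-' then pvCountDashes r + 1 else 0

-- outer while of A over the characters of MSA[0], carrying the current index i
def pvScanA : List Char → Int → List (List Int)
  | [], _ => []
  | c :: rest, i =>
    if c = '-' then
      -- start_idx = i; inner while advances past the dashes
      let k := pvCountDashes rest
      let endIdx := i + 1 + (k : Int)
      let res := pvScanA (rest.drop k) endIdx
      if endIdx - i > 1 then [i, endIdx] :: res else res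
    else
      pvScanA rest (i + 1)
  termination_by l _ => l.length
  decreasing_by
    · simp
    · simp

def get_gap_regions (MSA : List String) : List (List Int) :=
  pvScanA (MSA.headD "").toList 0

-- ===== PORT B =====
-- phase 1 of Source B: run-length encoding (inner while counts the equal characters after the head)
def pvRuns : List Char → List (Char × Nat)
  | [] => []
  | c :: rest =>
    let k := (rest.takeWhile (fun x => x == c)).length
    (c, k + 1) :: pvRuns (rest.drop k)
  termination_by l => l.length
  decreasing_by simp

-- phase 2 of Source B: one for-loop over the runs, carrying (pos, regions)
def pvStepB (st : Int × List (List Int)) (p : Char × Nat) : Int × List (List Int) :=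
  let e := st.1 + (p.2 : Int)
  (e, if p.1 = '-' ∧ p.2 > 1 then st.2 ++ [[st.1, e]] else st.2)

def get_gap_regions_alt (MSA : List String) : List (List Int) :=
  ((pvRuns (MSA.headD "").toList).foldl pvStepB ((0 : Int), ([] : List (List Int)))).2

-- ===== PRECONDITION & SPEC =====
-- Pre_ excludes only the empty MSA list, on which the Python A (and B) raises IndexError at MSA[0].
def Pre_get_gap_regions (MSA : List String) : Prop := MSA ≠ []
instance (MSA : List String) : Decidable (Pre_get_gap_regions MSA) := by unfold Pre_get_gap_regions; infer_instance
def pvWitness_get_gap_regions : List String := ["a--b---c"]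

def Spec_get_gap_regions (MSA : List String) (out : List (List Int)) : Prop := out = get_gap_regions_alt MSA
instance (MSA : List String) (out : List (List Int)) : Decidable (Spec_get_gap_regions MSA out) := by unfold Spec_get_gap_regions; infer_instance

-- ===== CLAIM (what is proved, stated in full; the proofs are below) =====
def Claim_equal_get_gap_regions : Prop := ∀ (MSA : List String), Dom_get_gap_regions MSA → Pre_get_gap_regions MSA → Spec_get_gap_regions MSA (get_gap_regions MSA)

-- ===== LEMMAS AND PROOFS =====

-- countDashes is the length of the dash prefix
lemma pvCountDashes_eq (l : List Char) :
    pvCountDashes l = (l.takeWhile (fun x => x == '-')).length := by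
  induction l with
  | nil => rfl
  | cons c r ih =>
    by_cases h : c = '-'
    · subst h; simp [pvCountDashes, List.takeWhile, ih]
    · have hb : (c == '-') = false := by simp [h]
      simp only [pvCountDashes, List.takeWhile, hb, if_neg h]
      rfl

lemma pv_drop_takeWhile (p : Char → Bool) (l : List Char) :
    l.drop (l.takeWhile p).length = l.dropWhile p := by
  induction l with
  | nil => rfl
  | cons c r ih =>
    by_cases h : p c
    · simp [List.takeWhile, List.dropWhile, h, ih]
    · simp [List.takeWhile, List.dropWhile, h]

-- A's scan skips a block of non-dash characters one at a time
lemma pvScanA_skip (u : List Char) :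
    ∀ (t : List Char) (i : Int), (∀ x ∈ u, x ≠ '-') →
      pvScanA (u ++ t) i = pvScanA t (i + (u.length : Nat)) := by
  induction u with
  | nil => intro t i _; simp
  | cons x u' ih =>
    intro t i h
    have hx : x ≠ '-' := h x (by simp)
    have := ih t (i + 1) (fun y hy => h y (by simp [hy]))
    simp only [List.cons_append, pvScanA, if_neg hx, this]
    congr 1
    simp only [List.length_cons]
    push_cast
    ring

-- main invariant: B's fold over the runs of s, started at position i, appends A's scan of s from i
lemma pv_fold_runs : ∀ (n : Nat) (s : List Char), s.length ≤ n →
    ∀ (i : Int) (acc : List (List Int)),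
      ((pvRuns s).foldl pvStepB (i, acc)).2 = acc ++ pvScanA s i := by
  intro n
  induction n with
  | zero =>
    intro s hs i acc
    have : s = [] := List.length_eq_zero_iff.mp (Nat.le_zero.mp hs)
    subst this; simp [pvRuns, pvScanA]
  | succ n ih =>
    intro s hs i acc
    match s with
    | [] => simp [pvRuns, pvScanA]
    | c :: rest =>
      set k := (rest.takeWhile (fun x => x == c)).length with hk
      have hdrop : (rest.drop k).length ≤ n := by
        have h1 : (rest.drop k).length ≤ rest.length := by simp
        have h2 : rest.length ≤ n := by simp at hs; omega
        omega
      have hruns : pvRuns (c :: rest) = (c, k + 1) :: pvRuns (rest.drop k) := by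
        rw [pvRuns]
      rw [hruns]
      simp only [List.foldl_cons]
      rw [ih (rest.drop k) hdrop]
      by_cases hc : c = '-'
      · subst hc
        -- dash run: A takes the else-branch, counts the same k dashes
        have hcd : pvCountDashes rest = k := by
          rw [pvCountDashes_eq, hk]
        have hA : pvScanA ('-' :: rest) i =
            (if (i + 1 + (k : Int)) - i > 1 then
              [i, i + 1 + (k : Int)] :: pvScanA (rest.drop k) (i + 1 + (k : Int))
             else pvScanA (rest.drop k) (i + 1 + (k : Int))) := by
          rw [pvScanA]
          simp [hcd]
        have hix : (i + ((k + 1 : Nat) : Int)) = i + 1 + (k : Int) := by push_cast; ring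
        rw [hA]
        simp only [pvStepB, hix]
        split_ifs with hc1 hc2
        · simp
        · exact absurd (by omega) hc2
        · exact absurd ⟨by trivial, by omega⟩ hc1
        · rfl
      · -- non-dash run: A steps through it one character at a time
        have hsplit : rest.takeWhile (fun x => x == c) ++ rest.drop k = rest := by
          rw [hk, pv_drop_takeWhile, List.takeWhile_append_dropWhile]
        have hmem : ∀ y ∈ rest.takeWhile (fun x => x == c), y ≠ '-' := by
          intro y hy
          have hyc : (y == c) = true := List.mem_takeWhile_imp (p := fun x => x == c) hy
          intro hydash
          exact hc (by rw [← eq_of_beq hyc, hydash])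
        have hA : pvScanA (c :: rest) i = pvScanA rest (i + 1) := by
          rw [pvScanA]; simp [hc]
        have hskip : pvScanA rest (i + 1) = pvScanA (rest.drop k) (i + 1 + (k : Int)) := by
          conv_lhs => rw [← hsplit]
          rw [pvScanA_skip _ _ _ hmem, hk]
        have h2 : ¬ (c = '-' ∧ k + 1 > 1) := by rintro ⟨h, _⟩; exact hc h
        have hix : (i + ((k + 1 : Nat) : Int)) = i + 1 + (k : Int) := by push_cast; ring
        rw [hA, hskip]
        simp only [pvStepB, if_neg h2, hix]

-- ===== VERDICT (by name: the statement is the Claim_ definition above) =====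
theorem get_gap_regions_spec : Claim_equal_get_gap_regions := by
  intro MSA _ _
  unfold Spec_get_gap_regions get_gap_regions get_gap_regions_alt
  rw [pv_fold_runs (MSA.headD "").toList.length _ (Nat.le_refl _)]
  simp
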